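-- pv_equiv track=rewrite | github.com/Adsdworld/Python-git | Morpion/tourner un morpion.py | tourner_morpion
-- ===== SOURCE A (Python) =====
-- def tourner_morpion(morpion, coefficient, ligne, colonne):
--     """
--     Retourne le morpion dans le sens horaire en fonction d'un coefficient de retournement.
--     Le coefficient doit être un entier compris entre 1 et 4 inclus.
--     La fonction retourne également les coordonnées de la ligne et de la colonne tournées.
--     """
--     if coefficient == 0 or coefficient == 4:
--         return morpion, ligne, colonne
--     elif coefficient == 1:
--         nouveau_morpion = [[morpion[2-i][j] for i in range(3)] for j in range(3)]
--         nouvelle_ligne = colonne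
--         nouvelle_colonne = 2 - ligne
--     elif coefficient == 2:
--         nouveau_morpion = [
--         [" ", " ", " "],
--         [" ", " ", " "],
--         [" ", " ", " "]]
--         nouveau_morpion[0][0] = morpion[2][2]
--         nouveau_morpion[0][1] = morpion[2][1]
--         nouveau_morpion[0][2] = morpion[2][0]
--         nouveau_morpion[1][0] = morpion[1][2]
--         nouveau_morpion[1][1] = morpion[1][1]
--         nouveau_morpion[1][2] = morpion[1][0]
--         nouveau_morpion[2][0] = morpion[0][2]
--         nouveau_morpion[2][1] = morpion[0][1]
--         nouveau_morpion[2][2] = morpion[0][0]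
--         nouvelle_ligne = 2 - ligne
--         nouvelle_colonne = 2 - colonne
--     elif coefficient == 3:
--         nouveau_morpion = [[morpion[i][2-j] for i in range(3)] for j in range(3)]
--         nouvelle_ligne = 2 - colonne
--         nouvelle_colonne = ligne
--     else:
--         raise ValueError("Le coefficient de retournement doit être un entier entre 1 et 4 inclus.")
--     return nouveau_morpion, nouvelle_ligne, nouvelle_colonne
-- ===== SOURCE B (Python) =====
-- def _rot90(grille, ligne, colonne):
--     """Rotate the 3x3 grid 90 degrees clockwise; a coordinate maps (l, c) -> (c, 2 - l)."""
--     grille = [[grille[2 - i][j] for i in range(3)] for j in range(3)]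
--     return grille, colonne, 2 - ligne
--
--
-- def tourner_morpion(morpion, coefficient, ligne, colonne):
--     if coefficient not in (0, 1, 2, 3, 4):
--         raise ValueError("Le coefficient de retournement doit être un entier entre 1 et 4 inclus.")
--     etat = (morpion, ligne, colonne)
--     for _ in range(coefficient % 4):
--         etat = _rot90(*etat)
--     return etat
-- ===== Notes on version B (the rewrite author's own statement) =====
-- stated objective: simpler
-- what changed: Replaces A's four enumerated rotation cases (including the hand-written 9-assignment 180-degree block) with one validation, coefficient % 4, and iterated application of a single 90-degree-clockwise primitive.
import Mathlib
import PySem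

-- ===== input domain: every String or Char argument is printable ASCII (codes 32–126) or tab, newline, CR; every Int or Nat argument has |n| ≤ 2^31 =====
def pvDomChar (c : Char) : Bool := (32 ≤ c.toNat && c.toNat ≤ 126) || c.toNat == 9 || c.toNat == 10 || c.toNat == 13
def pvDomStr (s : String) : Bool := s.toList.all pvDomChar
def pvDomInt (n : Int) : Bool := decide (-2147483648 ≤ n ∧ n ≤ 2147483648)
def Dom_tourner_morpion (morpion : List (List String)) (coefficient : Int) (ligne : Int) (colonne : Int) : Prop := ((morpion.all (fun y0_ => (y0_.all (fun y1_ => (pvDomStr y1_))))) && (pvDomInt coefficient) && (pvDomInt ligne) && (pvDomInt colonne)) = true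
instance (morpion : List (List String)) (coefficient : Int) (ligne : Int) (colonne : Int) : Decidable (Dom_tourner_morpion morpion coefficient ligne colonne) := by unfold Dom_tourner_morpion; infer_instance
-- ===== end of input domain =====

-- B changes: one 90-degree primitive applied (coefficient % 4) times, replacing A's four enumerated cases; simpler.
-- ===== PORT A =====
-- total indexing shim for Python's `m[i][j]` (default unreachable under Pre_)
def pvCell (m : List (List String)) (i j : Int) : String :=
  match PySem.List.pyGet? m i with
  | some r => (PySem.List.pyGet? r j).getD ""
  | none => ""

def tourner_morpion (morpion : List (List String)) (coefficient : Int) (ligne : Int) (colonne : Int) : List (List String) × Int × Int :=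
  if coefficient = 0 ∨ coefficient = 4 then (morpion, ligne, colonne)
  else if coefficient = 1 then
    (((PySem.List.pyRange 0 3 1).map fun j => (PySem.List.pyRange 0 3 1).map fun i => pvCell morpion (2 - i) j),
     colonne, 2 - ligne)
  else if coefficient = 2 then
    ([[pvCell morpion 2 2, pvCell morpion 2 1, pvCell morpion 2 0],
      [pvCell morpion 1 2, pvCell morpion 1 1, pvCell morpion 1 0],
      [pvCell morpion 0 2, pvCell morpion 0 1, pvCell morpion 0 0]],
     2 - ligne, 2 - colonne)
  else if coefficient = 3 then
    (((PySem.List.pyRange 0 3 1).map fun j => (PySem.List.pyRange 0 3 1).map fun i => pvCell morpion i (2 - j)),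
     2 - colonne, ligne)
  else (morpion, ligne, colonne)  -- Python raises ValueError here; excluded by Pre_

-- ===== PORT B =====
-- _rot90: rotate 90 degrees clockwise, (l, c) -> (c, 2 - l)
def pvRot90 (etat : List (List String) × Int × Int) : List (List String) × Int × Int :=
  (((PySem.List.pyRange 0 3 1).map fun j => (PySem.List.pyRange 0 3 1).map fun i => pvCell etat.1 (2 - i) j),
   etat.2.2, 2 - etat.2.1)

def tourner_morpion_alt (morpion : List (List String)) (coefficient : Int) (ligne : Int) (colonne : Int) : List (List String) × Int × Int :=
  if ¬ (coefficient = 0 ∨ coefficient = 1 ∨ coefficient = 2 ∨ coefficient = 3 ∨ coefficient = 4) then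
    (morpion, ligne, colonne)  -- Python raises ValueError here; excluded by Pre_
  else
    (List.range (PySem.Int.mod coefficient 4).toNat).foldl (fun etat _ => pvRot90 etat) (morpion, ligne, colonne)

-- ===== PRECONDITION & SPEC =====
-- Pre_ excludes exactly the inputs where A raises: a coefficient outside 0..4 (ValueError), and,
-- for coefficient 1/2/3, grids lacking three rows of at least three cells each (IndexError).
def Pre_tourner_morpion (morpion : List (List String)) (coefficient : Int) (ligne : Int) (colonne : Int) : Prop :=
  (coefficient = 0 ∨ coefficient = 4) ∨
  ((coefficient = 1 ∨ coefficient = 2 ∨ coefficient = 3) ∧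
    3 ≤ morpion.length ∧ ∀ r ∈ morpion.take 3, 3 ≤ r.length)
instance (morpion : List (List String)) (coefficient : Int) (ligne : Int) (colonne : Int) : Decidable (Pre_tourner_morpion morpion coefficient ligne colonne) := by unfold Pre_tourner_morpion; infer_instance

def pvWitness_tourner_morpion : List (List String) × Int × Int × Int :=
  ([["X", "O", " "], [" ", "X", "O"], ["O", " ", "X"]], 1, 0, 2)

def Spec_tourner_morpion (morpion : List (List String)) (coefficient : Int) (ligne : Int) (colonne : Int) (out : List (List String) × Int × Int) : Prop := out = tourner_morpion_alt morpion coefficient ligne colonne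
instance (morpion : List (List String)) (coefficient : Int) (ligne : Int) (colonne : Int) (out : List (List String) × Int × Int) : Decidable (Spec_tourner_morpion morpion coefficient ligne colonne out) := by unfold Spec_tourner_morpion; infer_instance

-- ===== CLAIM (what is proved, stated in full; the proofs are below) =====
def Claim_equal_tourner_morpion : Prop := ∀ (morpion : List (List String)) (coefficient : Int) (ligne : Int) (colonne : Int), Dom_tourner_morpion morpion coefficient ligne colonne → Pre_tourner_morpion morpion coefficient ligne colonne → Spec_tourner_morpion morpion coefficient ligne colonne (tourner_morpion morpion coefficient ligne colonne)

-- ===== LEMMAS AND PROOFS =====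

lemma pvRow3 {α : Type} (r : List α) (h : 3 ≤ r.length) : ∃ a b c t, r = a :: b :: c :: t := by
  rcases r with _ | ⟨a, _ | ⟨b, _ | ⟨c, t⟩⟩⟩
  · simp at h
  · simp at h
  · simp at h
  · exact ⟨a, b, c, t, rfl⟩

lemma pvGetC1 {α : Type} (x y : α) (t : List α) : PySem.List.pyGet? (x :: y :: t) 1 = some y := by
  rw [show (1 : Int) = ((1 : Nat) : Int) from rfl, PySem.List.pyGet?_natCast]; rfl

lemma pvGetC2 {α : Type} (x y z : α) (t : List α) : PySem.List.pyGet? (x :: y :: z :: t) 2 = some z := by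
  rw [show (2 : Int) = ((2 : Nat) : Int) from rfl, PySem.List.pyGet?_natCast]; rfl

-- ===== VERDICT (by name: the statement is the Claim_ definition above) =====
theorem tourner_morpion_spec : Claim_equal_tourner_morpion := by
  intro m co l c _ hpre
  unfold Spec_tourner_morpion
  have hr : PySem.List.pyRange 0 3 1 = [0, 1, 2] := by decide
  rcases hpre with (h | h) | ⟨hco, hlen, hrows⟩
  · subst h
    simp [tourner_morpion, tourner_morpion_alt, PySem.Int.mod]
  · subst h
    simp [tourner_morpion, tourner_morpion_alt, PySem.Int.mod]
  · rcases m with _ | ⟨r0, m⟩; · simp at hlen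
    rcases m with _ | ⟨r1, m⟩; · simp at hlen
    rcases m with _ | ⟨r2, t⟩; · simp at hlen
    have h0 := hrows r0 (by simp)
    have h1 := hrows r1 (by simp)
    have h2 := hrows r2 (by simp)
    obtain ⟨a0, b0, c0, t0, rfl⟩ := pvRow3 r0 h0
    obtain ⟨a1, b1, c1, t1, rfl⟩ := pvRow3 r1 h1
    obtain ⟨a2, b2, c2, t2, rfl⟩ := pvRow3 r2 h2
    rcases hco with h | h | h <;> subst h <;>
      simp [tourner_morpion, tourner_morpion_alt, pvRot90, pvCell, hr,
            PySem.Int.mod, pvGetC1, pvGetC2, List.range_succ]
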